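-- pv_equiv track=rewrite | github.com/prashanthja/humanoid_scientist_brain | dashboard/app.py | _extract_concept_single
-- ===== SOURCE A (Python) =====
-- def _extract_concept_single(query):
--     q = query.lower()
--     concept_map = {
--         "flashattention":"FlashAttention","flash attention":"FlashAttention",
--         "mixture of experts":"MixtureOfExperts","moe":"MixtureOfExperts",
--         "kv cache":"KVCache","lora":"LoRA","low-rank":"LoRA",
--         "sparse attention":"SparseAttention","speculative decoding":"SpeculativeDecoding",
--         "mamba":"Mamba","rwkv":"RWKV","quantization":"Quantization",
--         "paged attention":"PagedAttention","grouped query":"GroupedQueryAttention",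
--         "rotary":"RoPE","rope":"RoPE","sliding window":"SlidingWindowAttention",
--         "linear attention":"LinearAttention","context length":"ContextLength",
--         "memory":"MemoryOverhead","latency":"Latency","throughput":"Throughput",
--     }
--     for kw, concept in sorted(concept_map.items(), key=lambda x: -len(x[0])):
--         if kw in q: return concept
--     return query[:40]
-- ===== SOURCE B (Python) =====
-- def _extract_concept_single(query):
--     q = query.lower()
--     concept_map = {
--         "flashattention":"FlashAttention","flash attention":"FlashAttention",
--         "mixture of experts":"MixtureOfExperts","moe":"MixtureOfExperts",
--         "kv cache":"KVCache","lora":"LoRA","low-rank":"LoRA",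
--         "sparse attention":"SparseAttention","speculative decoding":"SpeculativeDecoding",
--         "mamba":"Mamba","rwkv":"RWKV","quantization":"Quantization",
--         "paged attention":"PagedAttention","grouped query":"GroupedQueryAttention",
--         "rotary":"RoPE","rope":"RoPE","sliding window":"SlidingWindowAttention",
--         "linear attention":"LinearAttention","context length":"ContextLength",
--         "memory":"MemoryOverhead","latency":"Latency","throughput":"Throughput",
--     }
--     best_concept = None
--     best_len = -1
--     for kw, concept in concept_map.items():
--         if kw in q and len(kw) > best_len:
--             best_concept, best_len = concept, len(kw)
--     return best_concept if best_concept is not None else query[:40]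
-- ===== Notes on version B (the rewrite author's own statement) =====
-- stated objective: simpler
-- what changed: Replaces the sort-by-descending-keyword-length plus first-substring-hit scan with a single insertion-order pass keeping a best_concept/best_len tracker (strict > reproduces the stable-sort tie-break), falling back to query[:40].
import Mathlib
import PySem

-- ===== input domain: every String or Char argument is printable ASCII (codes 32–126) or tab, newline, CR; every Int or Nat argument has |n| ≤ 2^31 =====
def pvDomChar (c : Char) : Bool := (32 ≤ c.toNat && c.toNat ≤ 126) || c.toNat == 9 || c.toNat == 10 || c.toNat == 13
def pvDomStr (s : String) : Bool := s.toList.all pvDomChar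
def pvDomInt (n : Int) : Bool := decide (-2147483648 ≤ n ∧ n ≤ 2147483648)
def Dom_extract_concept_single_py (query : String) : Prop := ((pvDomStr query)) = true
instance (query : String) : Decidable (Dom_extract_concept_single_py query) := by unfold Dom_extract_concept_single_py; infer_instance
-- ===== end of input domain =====

-- B replaces A's sort-by-descending-keyword-length + first-substring-hit scan by a single
-- insertion-order pass with a best_concept/best_len tracker (objective: simpler).


-- the concept_map dict literal, shared by both ports (an association list in insertion order)
def pvConceptMap : List (String × String) :=
  [("flashattention","FlashAttention"),("flash attention","FlashAttention"),
   ("mixture of experts","MixtureOfExperts"),("moe","MixtureOfExperts"),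
   ("kv cache","KVCache"),("lora","LoRA"),("low-rank","LoRA"),
   ("sparse attention","SparseAttention"),("speculative decoding","SpeculativeDecoding"),
   ("mamba","Mamba"),("rwkv","RWKV"),("quantization","Quantization"),
   ("paged attention","PagedAttention"),("grouped query","GroupedQueryAttention"),
   ("rotary","RoPE"),("rope","RoPE"),("sliding window","SlidingWindowAttention"),
   ("linear attention","LinearAttention"),("context length","ContextLength"),
   ("memory","MemoryOverhead"),("latency","Latency"),("throughput","Throughput")]

-- ===== PORT A =====
-- A's 'for kw, concept in …: if kw in q: return concept' loop
def pvScanA (q : String) : List (String × String) → Option String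
  | [] => none
  | (kw, c) :: t => if PySem.Str.isIn kw q then some c else pvScanA q t

def extract_concept_single_py (query : String) : String :=
  let q := PySem.Str.lower query
  match pvScanA q (PySem.List.sorted pvConceptMap (fun x => -(PySem.Str.len x.1))) with
  | some c => c
  | none => PySem.Str.slice query none (some 40)

-- ===== PORT B =====
def extract_concept_single_py_alt (query : String) : String :=
  let q := PySem.Str.lower query
  let r := pvConceptMap.foldl
    (fun (acc : Option String × Int) kc =>
      if PySem.Str.isIn kc.1 q && decide (acc.2 < PySem.Str.len kc.1) then (some kc.2, PySem.Str.len kc.1) else acc)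
    (none, -1)
  match r.1 with
  | some c => c
  | none => PySem.Str.slice query none (some 40)

-- ===== PRECONDITION & SPEC =====
def Spec_extract_concept_single_py (query : String) (out : String) : Prop := out = extract_concept_single_py_alt query
instance (query : String) (out : String) : Decidable (Spec_extract_concept_single_py query out) := by unfold Spec_extract_concept_single_py; infer_instance

-- ===== CLAIM (what is proved, stated in full; the proofs are below) =====
def Claim_equal_extract_concept_single_py : Prop := ∀ (query : String), Dom_extract_concept_single_py query → Spec_extract_concept_single_py query (extract_concept_single_py query)

-- ===== LEMMAS AND PROOFS =====

-- first match together with its keyword length (proof-side view of A's scan)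
def pvScan2 {α β : Type} (p : α → Bool) (w : α → Int) : List (α × β) → Option (β × Int)
  | [] => none
  | (kw, c) :: t => if p kw then some (c, w kw) else pvScan2 p w t

def pvToAcc {β : Type} : Option (β × Int) → Option β × Int
  | none => (none, -1)
  | some (c, m) => (some c, m)

theorem pvScanA_eq_scan2 (q : String) (l : List (String × String)) :
    pvScanA q l = (pvScan2 (fun kw => PySem.Str.isIn kw q) PySem.Str.len l).map Prod.fst := by
  induction l with
  | nil => rfl
  | cons x t ih => obtain ⟨kw, c⟩ := x; simp [pvScanA, pvScan2]; split_ifs <;> simp [ih]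

theorem pvScan2_mem {α β : Type} (p : α → Bool) (w : α → Int) (l : List (α × β)) (c : β) (m : Int)
    (h : pvScan2 p w l = some (c, m)) : ∃ z ∈ l, p z.1 = true ∧ w z.1 = m := by
  induction l with
  | nil => simp [pvScan2] at h
  | cons x t ih =>
    obtain ⟨kw, c'⟩ := x
    by_cases hp : p kw = true
    · simp [pvScan2, hp] at h
      exact ⟨(kw, c'), by simp, hp, h.2⟩
    · simp [pvScan2, hp] at h
      obtain ⟨z, hz, h1, h2⟩ := ih h
      exact ⟨z, by simp [hz], h1, h2⟩

theorem pvScan2_insert_false {α β : Type} (p : α → Bool) (w : α → Int) (b : α × β → α × β → Bool)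
    (x : α × β) (hx : p x.1 = false) (l : List (α × β)) :
    pvScan2 p w (PySem.List.insertBy b x l) = pvScan2 p w l := by
  induction l with
  | nil => simp [PySem.List.insertBy, pvScan2, hx]
  | cons y t ih =>
    simp only [PySem.List.insertBy]
    split_ifs with hb
    · obtain ⟨kw, c⟩ := x; simp at hx; simp [pvScan2, hx]
    · obtain ⟨kw, c⟩ := y
      by_cases hp : p kw = true <;> simp [pvScan2, hp, ih]

theorem pvScan2_insert_true {α β : Type} (p : α → Bool) (w : α → Int)
    (x : α × β) (hx : p x.1 = true) (l : List (α × β))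
    (hs : l.Pairwise (fun a b => -(w a.1) ≤ -(w b.1))) :
    pvScan2 p w (PySem.List.insertBy (fun a b => decide (-(w a.1) < -(w b.1))) x l) =
      (match pvScan2 p w l with
       | none => some (x.2, w x.1)
       | some (c, m) => if m < w x.1 then some (x.2, w x.1) else some (c, m)) := by
  induction l with
  | nil => obtain ⟨kw, c⟩ := x; simp at hx; simp [PySem.List.insertBy, pvScan2, hx]
  | cons y t ih =>
    obtain ⟨ykw, yc⟩ := y
    have hpw := List.pairwise_cons.mp hs
    simp only [PySem.List.insertBy]
    split_ifs with hb
    · -- x inserted in front: w ykw < w x.1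
      obtain ⟨kw, c⟩ := x
      simp at hx hb
      by_cases hp : p ykw = true
      · simp [pvScan2, hx, hp]
        omega
      · simp [pvScan2, hx, hp]
        cases h2 : pvScan2 p w t with
        | none => simp
        | some r =>
          obtain ⟨c', m⟩ := r
          obtain ⟨z, hz, _, hwz⟩ := pvScan2_mem p w t c' m h2
          have h3 : -(w ykw) ≤ -(w z.1) := hpw.1 z hz
          simp
          omega
    · -- x goes further right: w x.1 ≤ w ykw
      obtain ⟨kw, c⟩ := x
      simp only [decide_eq_true_eq, not_lt] at hb
      by_cases hp : p ykw = true
      · simp [pvScan2, hp]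
        omega
      · simp only [pvScan2, hp, Bool.false_eq_true, if_false]
        exact ih hpw.2

-- one B-step agrees with scanning the keyword inserted into the sorted list
theorem pvStep_insert {α β : Type} (p : α → Bool) (w : α → Int) (hw : ∀ a, 0 ≤ w a)
    (x : α × β) (l : List (α × β))
    (hs : l.Pairwise (fun a b => -(w a.1) ≤ -(w b.1))) :
    pvToAcc (pvScan2 p w (PySem.List.insertBy (fun a b => decide (-(w a.1) < -(w b.1))) x l)) =
      (if p x.1 && decide ((pvToAcc (pvScan2 p w l)).2 < w x.1) then (some x.2, w x.1)
       else pvToAcc (pvScan2 p w l)) := by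
  by_cases hx : p x.1 = true
  · rw [pvScan2_insert_true p w x hx l hs]
    cases h : pvScan2 p w l with
    | none => simp [pvToAcc, hx]; have := hw x.1; omega
    | some r =>
      obtain ⟨c, m⟩ := r
      by_cases hm : m < w x.1 <;> simp [pvToAcc, hx, hm]
  · simp at hx
    rw [pvScan2_insert_false p w _ x hx l]
    simp [hx]

theorem pvMain {α β : Type} [DecidableEq α] [DecidableEq β] (p : α → Bool) (w : α → Int)
    (hw : ∀ a, 0 ≤ w a) (items : List (α × β)) :
    items.foldl
      (fun (acc : Option β × Int) kc =>
        if p kc.1 && decide (acc.2 < w kc.1) then (some kc.2, w kc.1) else acc)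
      (none, -1) =
    pvToAcc (pvScan2 p w (PySem.List.sorted items (fun x => -(w x.1)))) := by
  induction items using List.reverseRecOn with
  | nil => rfl
  | append_singleton xs x ih =>
    rw [List.foldl_append, ih, PySem.List.sorted_eq_foldl_insertBy (xs ++ [x]), List.foldl_append]
    simp only [List.foldl_cons, List.foldl_nil]
    rw [← PySem.List.sorted_eq_foldl_insertBy]
    rw [pvStep_insert p w hw x _ (PySem.List.sorted_pairwise xs (fun x => -(w x.1)))]

-- ===== VERDICT (by name: the statement is the Claim_ definition above) =====
theorem extract_concept_single_py_spec : Claim_equal_extract_concept_single_py := by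
  intro query _
  show extract_concept_single_py query = extract_concept_single_py_alt query
  unfold extract_concept_single_py extract_concept_single_py_alt
  have hw : ∀ a : String, 0 ≤ PySem.Str.len a := by
    intro a; simp [PySem.Str.len_eq]
  have h := pvMain (fun kw => PySem.Str.isIn kw (PySem.Str.lower query)) PySem.Str.len hw pvConceptMap
  simp only [] at h
  simp only []
  rw [h, pvScanA_eq_scan2]
  cases h2 : pvScan2 (fun kw => PySem.Str.isIn kw (PySem.Str.lower query)) PySem.Str.len
      (PySem.List.sorted pvConceptMap fun x => -(PySem.Str.len x.1)) with
  | none => simp [pvToAcc]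
  | some r => obtain ⟨c, m⟩ := r; simp [pvToAcc]
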